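-- pv_equiv track=rewrite | github.com/Cycyber/CCPS109---Computer-Science-1 | labs109.py | brangelina
-- ===== SOURCE A (Python) =====
-- def brangelina(first, second):
--     vowels = ['a', 'e', 'i', 'o', 'u']
--     first_name_vgi = 0
--     second_name_vgi = 0
--     stop = False
--     for i in range(len(first)):  # first name vowel group index
--         if first[i] in vowels:
--             if not stop:
--                 first_name_vgi = i
--                 stop = True
--         else:
--             stop = False
--     for i in range(len(second)):  # second name vowel group index
--         if second[i] in vowels:
--             break
--         second_name_vgi += 1
--     stop = False
--     for i in range(first_name_vgi - 1, -1, -1):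
--         if first[i] in vowels:
--             first_name_vgi = i
--             stop = True
--         else:
--             if stop:
--                 break
--     return first[:first_name_vgi] + second[second_name_vgi:]  # return combined word
-- ===== SOURCE B (Python) =====
-- def brangelina(first, second):
--     vowels = set('aeiou')
--     # one forward pass: collect the start index of every vowel group
--     starts = []
--     i = 0
--     prev = False
--     for c in first:
--         v = c in vowels
--         if v and not prev:
--             starts.append(i)
--         prev = v
--         i += 1
--     if len(starts) >= 2:
--         cut = starts[-2]
--     elif starts:
--         cut = starts[0]
--     else:
--         cut = 0
--     j = 0
--     for c in second:
--         if c in vowels: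
--             break
--         j += 1
--     return first[:cut] + second[j:]
-- ===== Notes on version B (the rewrite author's own statement) =====
-- stated objective: simpler
-- what changed: A finds the last vowel-group start in a forward index scan and then re-scans backwards for the penultimate one; B collects all vowel-group starts in a single forward pass over the characters and picks starts[-2] (or starts[0], or 0) directly, with no backward re-scan.
import Mathlib
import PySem

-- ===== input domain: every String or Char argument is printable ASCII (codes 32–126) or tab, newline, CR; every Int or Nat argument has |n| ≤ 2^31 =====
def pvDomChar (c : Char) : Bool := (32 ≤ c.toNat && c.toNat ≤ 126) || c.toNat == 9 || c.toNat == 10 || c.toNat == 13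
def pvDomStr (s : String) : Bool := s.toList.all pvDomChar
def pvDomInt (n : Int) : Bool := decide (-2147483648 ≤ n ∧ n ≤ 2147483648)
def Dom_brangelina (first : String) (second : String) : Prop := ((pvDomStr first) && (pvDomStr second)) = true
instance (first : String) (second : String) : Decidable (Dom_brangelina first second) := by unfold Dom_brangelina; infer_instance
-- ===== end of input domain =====

-- B replaces A's forward-scan-then-backward-rescan with a single forward pass collecting
-- all vowel-group start indices and indexing that list (objective: simpler).

def isVow (c : Char) : Bool := c == 'a' || c == 'e' || c == 'i' || c == 'o' || c == 'u'

-- ===== PORT A =====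
-- loop 1: forward scan, remembers the start of the LAST vowel group in first
def brA_loop1 (cs : List Char) : Nat × Bool :=
  (List.range cs.length).foldl
    (fun (st : Nat × Bool) i =>
      if isVow (cs.getD i ' ') then (if st.2 then st else (i, true)) else (st.1, false))
    (0, false)

-- loop 2: counts leading non-vowels of second (index access as in A; i < len so getD is exact)
def brA_loop2Aux (ds : List Char) : List Nat → Nat → Nat
  | [], acc => acc
  | i :: rest, acc => if isVow (ds.getD i ' ') then acc else brA_loop2Aux ds rest (acc + 1)

-- loop 3: backward scan from first_name_vgi-1 down to 0 (fuel j processes indices j-1 … 0)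
def brA_back (cs : List Char) : Nat → Nat → Bool → Nat
  | 0, vgi, _ => vgi
  | i + 1, vgi, stop =>
    if isVow (cs.getD i ' ') then brA_back cs i i true
    else if stop then vgi else brA_back cs i vgi stop

def brangelina (first : String) (second : String) : String :=
  let cs := first.toList
  let ds := second.toList
  let vgi1 := (brA_loop1 cs).1
  let svgi := brA_loop2Aux ds (List.range ds.length) 0
  let cut := brA_back cs vgi1 vgi1 false
  String.ofList (cs.take cut ++ ds.drop svgi)

-- ===== PORT B =====
-- one forward pass: collect start index of every vowel group (state: starts, counter, prev-was-vowel)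
def brB_step (st : List Nat × Nat × Bool) (c : Char) : List Nat × Nat × Bool :=
  let v := isVow c
  ((if v && !st.2.2 then st.1 ++ [st.2.1] else st.1), st.2.1 + 1, v)

def brB_starts (cs : List Char) : List Nat :=
  (cs.foldl brB_step ([], 0, false)).1

def brB_j : List Char → Nat
  | [] => 0
  | c :: r => if isVow c then 0 else brB_j r + 1

def brangelina_alt (first : String) (second : String) : String :=
  let starts := brB_starts first.toList
  let cut := if 2 ≤ starts.length then starts.getD (starts.length - 2) 0
             else starts.headD 0
  String.ofList (first.toList.take cut ++ second.toList.drop (brB_j second.toList))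

-- ===== PRECONDITION & SPEC =====
def Spec_brangelina (first : String) (second : String) (out : String) : Prop := out = brangelina_alt first second
instance (first : String) (second : String) (out : String) : Decidable (Spec_brangelina first second out) := by unfold Spec_brangelina; infer_instance

-- ===== CLAIM (what is proved, stated in full; the proofs are below) =====
def Claim_equal_brangelina : Prop := ∀ (first : String) (second : String), Dom_brangelina first second → Spec_brangelina first second (brangelina first second)

-- ===== LEMMAS AND PROOFS =====

-- V cs i: position i of cs holds a vowel (default-padded)
def V (cs : List Char) (i : Nat) : Bool := isVow (cs.getD i ' ')

-- the spec list of vowel-group starts among the first m positions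
def S (cs : List Char) (m : Nat) : List Nat :=
  (List.range m).filter (fun i => V cs i && (decide (i = 0) || !V cs (i - 1)))

-- gs i: the start of the vowel group containing i (meaningful when V cs i)
def gs (cs : List Char) : Nat → Nat
  | 0 => 0
  | i + 1 => if V cs i then gs cs i else i + 1

-- lv j: the largest vowel position strictly below j, if any
def lv (cs : List Char) : Nat → Option Nat
  | 0 => none
  | j + 1 => if V cs j then some j else lv cs j

theorem getD_of_lt {α : Type} [Inhabited α] (l : List α) (k : Nat) (d : α) (h : k < l.length) :
    l.getD k d = l[k] := by
  simp [List.getD_eq_getElem?_getD, List.getElem?_eq_getElem h]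

-- loop 1 of A computes the last element of the starts list (and stop = previous char was a vowel)
theorem loop1_gen (cs : List Char) (m : Nat) :
    (List.range m).foldl
      (fun (st : Nat × Bool) i =>
        if isVow (cs.getD i ' ') then (if st.2 then st else (i, true)) else (st.1, false))
      (0, false)
    = ((S cs m).getLastD 0, decide (m ≠ 0) && V cs (m - 1)) := by
  induction m with
  | zero => simp [S]
  | succ m ih =>
    rw [List.range_succ, List.foldl_append, ih]
    have hS : S cs (m + 1)
        = S cs m ++ (if (V cs m && (decide (m = 0) || !V cs (m - 1))) = true then [m] else []) := by
      simp only [S, List.range_succ, List.filter_append, List.filter_singleton,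
        Bool.cond_eq_ite]
    rw [hS]
    simp only [List.foldl_cons, List.foldl_nil]
    rw [show isVow (cs.getD m ' ') = V cs m from rfl]
    rw [show (decide (m + 1 ≠ 0) && V cs (m + 1 - 1)) = V cs m by simp]
    by_cases hv : V cs m = true
    · by_cases hs : (decide (m ≠ 0) && V cs (m - 1)) = true
      · have hpred : (V cs m && (decide (m = 0) || !V cs (m - 1))) = false := by
          simp only [Bool.and_eq_true, decide_eq_true_eq] at hs
          simp [hv, hs.1, hs.2]
        rw [hpred, hv, hs]
        simp
      · have hsf := (Bool.not_eq_true _).mp hs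
        have hpred : (V cs m && (decide (m = 0) || !V cs (m - 1))) = true := by
          rcases Bool.and_eq_false_iff.mp hsf with h | h
          · simp only [decide_eq_false_iff_not, ne_eq, not_not] at h
            simp only [h] at hv ⊢
            simp [hv]
          · simp [hv, h]
        rw [hpred, hv, hsf]
        simp
    · have hvf := (Bool.not_eq_true _).mp hv
      have hpred : (V cs m && (decide (m = 0) || !V cs (m - 1))) = false := by simp [hvf]
      rw [hpred, hvf]
      simp

-- loop 2 of A equals B's leading-consonant count
theorem loop2_gen (ds : List Char) :
    ∀ (n k acc : Nat), k + n = ds.length →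
      brA_loop2Aux ds (List.range' k n) acc = acc + brB_j (ds.drop k) := by
  intro n
  induction n with
  | zero =>
    intro k acc h
    have : ds.drop k = [] := List.drop_eq_nil_of_le (by omega)
    simp [brA_loop2Aux, this, brB_j]
  | succ n ih =>
    intro k acc h
    have hk : k < ds.length := by omega
    have hdrop : ds.drop k = ds[k] :: ds.drop (k + 1) := (List.getElem_cons_drop hk).symm
    rw [List.range'_succ]
    simp only [brA_loop2Aux, getD_of_lt ds k ' ' hk]
    by_cases hv : isVow ds[k]
    · rw [hdrop]
      simp only [brB_j, hv, if_true]
      omega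
    · simp only [hv, Bool.false_eq_true, if_false]
      rw [ih (k + 1) (acc + 1) (by omega), hdrop]
      simp only [brB_j, hv, Bool.false_eq_true, if_false]
      omega

-- B's single pass computes exactly the starts list S
theorem starts_gen (fs : List Char) :
    ∀ (n k : Nat) (acc : List Nat), k + n = fs.length →
      ((fs.drop k).foldl brB_step (acc, k, decide (k ≠ 0) && V fs (k - 1))).1
      = acc ++ (List.range' k n).filter (fun i => V fs i && (decide (i = 0) || !V fs (i - 1))) := by
  intro n
  induction n with
  | zero =>
    intro k acc h
    have : fs.drop k = [] := List.drop_eq_nil_of_le (by omega)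
    simp [this]
  | succ n ih =>
    intro k acc h
    have hk : k < fs.length := by omega
    have hdrop : fs.drop k = fs[k] :: fs.drop (k + 1) := (List.getElem_cons_drop hk).symm
    have hVk : isVow fs[k] = V fs k := by
      unfold V; rw [getD_of_lt fs k ' ' hk]
    have hcond : (isVow fs[k] && !(decide (k ≠ 0) && V fs (k - 1)))
        = (V fs k && (decide (k = 0) || !V fs (k - 1))) := by
      rw [hVk]; cases V fs k <;> cases V fs (k - 1) <;> by_cases h0 : k = 0 <;> simp [h0]
    have hstep : brB_step (acc, k, decide (k ≠ 0) && V fs (k - 1)) fs[k]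
        = ((if (V fs k && (decide (k = 0) || !V fs (k - 1))) = true then acc ++ [k] else acc),
           k + 1, decide (k + 1 ≠ 0) && V fs (k + 1 - 1)) := by
      simp only [brB_step, hcond]
      rw [hVk]
      simp
    rw [hdrop, List.foldl_cons, hstep, List.range'_succ, List.filter_cons]
    by_cases hc : (V fs k && (decide (k = 0) || !V fs (k - 1))) = true
    · rw [if_pos hc, if_pos hc, ih (k + 1) (acc ++ [k]) (by omega)]
      simp
    · rw [if_neg hc, if_neg hc, ih (k + 1) acc (by omega)]

theorem brB_starts_eq_S (cs : List Char) : brB_starts cs = S cs cs.length := by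
  have h := starts_gen cs cs.length 0 [] (by omega)
  simp only [List.drop_zero, List.nil_append] at h
  rw [show (decide ((0:Nat) ≠ 0) && V cs (0 - 1)) = false by simp] at h
  rw [brB_starts, h, S, List.range_eq_range']

theorem mem_S {cs : List Char} {m t : Nat} :
    t ∈ S cs m ↔ t < m ∧ (V cs t && (decide (t = 0) || !V cs (t - 1))) = true := by
  simp [S, List.mem_filter, List.mem_range]

theorem sorted_S (cs : List Char) (m : Nat) : (S cs m).Pairwise (· < ·) :=
  (List.pairwise_lt_range).filter _

-- properties of the group-start function gs
theorem gs_props (cs : List Char) :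
    ∀ i, V cs i = true →
      V cs (gs cs i) = true ∧ gs cs i ≤ i ∧ (gs cs i = 0 ∨ V cs (gs cs i - 1) = false) ∧
      (∀ m, gs cs i ≤ m → m ≤ i → V cs m = true) := by
  intro i
  induction i with
  | zero =>
    intro hv
    refine ⟨by simpa [gs] using hv, by simp [gs], Or.inl (by simp [gs]), ?_⟩
    intro m h1 h2; interval_cases m; simpa [gs] using hv
  | succ i ih =>
    intro hv
    by_cases hvi : V cs i = true
    · obtain ⟨h1, h2, h3, h4⟩ := ih hvi
      refine ⟨by simpa [gs, hvi] using h1, by simp [gs, hvi]; omega, ?_, ?_⟩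
      · simpa [gs, hvi] using h3
      · intro m hm1 hm2
        simp only [gs, hvi, if_true] at hm1 ⊢
        rcases Nat.lt_or_ge m (i + 1) with h | h
        · exact h4 m hm1 (by omega)
        · have : m = i + 1 := by omega
          subst this; exact hv
    · have hvf := (Bool.not_eq_true _).mp hvi
      refine ⟨by simp [gs, hvf]; exact hv, by simp [gs, hvf], ?_, ?_⟩
      · right; simp [gs, hvf]
      · intro m hm1 hm2
        simp only [gs, hvf, Bool.false_eq_true, if_false] at hm1
        have : m = i + 1 := by omega
        subst this; exact hv

theorem back_run (cs : List Char) :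
    ∀ i, V cs i = true → brA_back cs i i true = gs cs i := by
  intro i
  induction i with
  | zero => intro _; simp [brA_back, gs]
  | succ i ih =>
    intro _
    have hstep : brA_back cs (i + 1) (i + 1) true
        = if isVow (cs.getD i ' ') = true then brA_back cs i i true else (i + 1) := by
      simp only [brA_back, if_true]
    rw [hstep, show isVow (cs.getD i ' ') = V cs i from rfl]
    by_cases hvi : V cs i = true
    · rw [hvi, if_pos rfl, ih hvi]
      simp [gs, hvi]
    · have hvf := (Bool.not_eq_true _).mp hvi
      rw [hvf]
      simp [gs, hvf]

theorem back_vowel (cs : List Char) :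
    ∀ i v s, V cs i = true → brA_back cs (i + 1) v s = gs cs i := by
  intro i v s hv
  have hstep : brA_back cs (i + 1) v s
      = if isVow (cs.getD i ' ') = true then brA_back cs i i true
        else (if s = true then v else brA_back cs i v s) := by
    simp only [brA_back]
  rw [hstep, show isVow (cs.getD i ' ') = V cs i from rfl, hv, if_pos rfl]
  exact back_run cs i hv

theorem back_char (cs : List Char) :
    ∀ j v, brA_back cs j v false = (match lv cs j with | none => v | some k => gs cs k) := by
  intro j
  induction j with
  | zero => intro v; simp [brA_back, lv]
  | succ j ih =>
    intro v
    by_cases hv : V cs j = true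
    · rw [back_vowel cs j v false hv]
      simp [lv, hv]
    · simp only [brA_back]
      rw [show isVow (cs.getD j ' ') = V cs j from rfl, (Bool.not_eq_true _).mp hv]
      simp only [Bool.false_eq_true, if_false]
      rw [ih v]
      simp [lv, hv]

theorem lv_none (cs : List Char) : ∀ j, lv cs j = none → ∀ m, m < j → V cs m = false := by
  intro j
  induction j with
  | zero => intro _ m hm; omega
  | succ j ih =>
    intro h m hm
    by_cases hv : V cs j = true
    · simp [lv, hv] at h
    · rcases Nat.lt_or_ge m j with h' | h'
      · exact ih (by simpa [lv, hv] using h) m h'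
      · have : m = j := by omega
        subst this; exact (Bool.not_eq_true _).mp hv

theorem lv_some (cs : List Char) :
    ∀ j k, lv cs j = some k →
      V cs k = true ∧ k < j ∧ ∀ m, k < m → m < j → V cs m = false := by
  intro j
  induction j with
  | zero => intro k h; simp [lv] at h
  | succ j ih =>
    intro k h
    by_cases hv : V cs j = true
    · simp [lv, hv] at h
      subst h
      exact ⟨hv, by omega, fun m h1 h2 => by omega⟩
    · simp only [lv, (Bool.not_eq_true _).mp hv, Bool.false_eq_true, if_false] at h
      obtain ⟨h1, h2, h3⟩ := ih k h
      refine ⟨h1, by omega, ?_⟩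
      intro m hm1 hm2
      rcases Nat.lt_or_ge m j with h' | h'
      · exact h3 m hm1 h'
      · have : m = j := by omega
        subst this; exact (Bool.not_eq_true _).mp hv

-- gs of a vowel position below the length is itself a recorded start
theorem gs_mem_S (cs : List Char) {k : Nat} (hv : V cs k = true) (hk : k < cs.length) :
    gs cs k ∈ S cs cs.length := by
  obtain ⟨h1, h2, h3, _⟩ := gs_props cs k hv
  rw [mem_S]
  refine ⟨by omega, ?_⟩
  simp only [Bool.and_eq_true, Bool.or_eq_true, Bool.not_eq_true']
  refine ⟨h1, ?_⟩
  rcases h3 with h | h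
  · exact Or.inl (by simp [h])
  · exact Or.inr h

-- the central lemma: A's double scan and B's list indexing give the same cut
theorem cut_eq (cs : List Char) :
    brA_back cs ((brA_loop1 cs).1) ((brA_loop1 cs).1) false
      = (if 2 ≤ (brB_starts cs).length then (brB_starts cs).getD ((brB_starts cs).length - 2) 0
         else (brB_starts cs).headD 0) := by
  rw [brB_starts_eq_S]
  have hloop1 : (brA_loop1 cs).1 = (S cs cs.length).getLastD 0 := by
    rw [brA_loop1, loop1_gen]
  rw [hloop1]
  rcases List.eq_nil_or_concat (S cs cs.length) with hS | ⟨L, q, hS⟩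
  · rw [hS]; simp [brA_back]
  · rw [List.concat_eq_append] at hS
    rw [hS, List.getLastD_concat]
    have hqS : q ∈ S cs cs.length := by rw [hS]; simp
    have hqn : q < cs.length := (mem_S.mp hqS).1
    rcases List.eq_nil_or_concat L with hL | ⟨M, p, hL⟩
    · -- exactly one vowel group: the backward scan finds no vowel and keeps q
      subst hL
      have hlv : lv cs q = none := by
        cases h : lv cs q with
        | none => rfl
        | some k =>
          obtain ⟨hk1, hk2, _⟩ := lv_some cs q k h
          have hmem := gs_mem_S cs hk1 (by omega)
          rw [hS] at hmem
          obtain ⟨_, hle, _, _⟩ := gs_props cs k hk1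
          simp at hmem
          omega
      rw [back_char, hlv]
      simp
    · -- at least two groups: the backward scan finds the penultimate start p
      rw [List.concat_eq_append] at hL
      subst hL
      have hsort := sorted_S cs cs.length
      rw [hS, List.append_assoc] at hsort
      have hpair := List.pairwise_append.mp hsort
      have hpq : p < q := by
        have := hpair.2.1
        simp at this; exact this
      have hM : ∀ x ∈ M, x < p := fun x hx => hpair.2.2 x hx p (by simp)
      have hpS : p ∈ S cs cs.length := by rw [hS]; simp
      have hpprop := mem_S.mp hpS
      have hVp : V cs p = true := by
        have := hpprop.2; simp only [Bool.and_eq_true] at this; exact this.1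
      have hpstart : p = 0 ∨ V cs (p - 1) = false := by
        have := hpprop.2
        simp only [Bool.and_eq_true, Bool.or_eq_true, Bool.not_eq_true'] at this
        rcases this.2 with h | h
        · left; simpa using h
        · right; exact h
      cases hlv : lv cs q with
      | none =>
        have := lv_none cs q hlv p hpq
        rw [hVp] at this; exact absurd this (by simp)
      | some k =>
        obtain ⟨hk1, hk2, hk3⟩ := lv_some cs q k hlv
        have hpk : p ≤ k := by
          by_contra h
          have := hk3 p (by omega) hpq
          rw [hVp] at this; exact absurd this (by simp)
        obtain ⟨hg1, hg2, hg3, hg4⟩ := gs_props cs k hk1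
        have hmem := gs_mem_S cs hk1 (by omega)
        rw [hS] at hmem
        have hgp : gs cs k = p := by
          simp only [List.append_assoc, List.mem_append, List.mem_cons,
            List.mem_singleton, List.not_mem_nil, or_false] at hmem
          rcases hmem with hm | hm | hm
          · exfalso
            have hlt : gs cs k < p := hM _ hm
            have hp0 : p ≠ 0 := by omega
            rcases hpstart with h | h
            · exact hp0 h
            · have := hg4 (p - 1) (by omega) (by omega)
              rw [h] at this; exact absurd this (by simp)
          · exact hm
          · exfalso; omega
        rw [back_char, hlv]
        change gs cs k = _
        rw [hgp]
        have hlen : 2 ≤ (M ++ [p] ++ [q]).length := by simp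
        rw [if_pos hlen]
        rw [show (M ++ [p] ++ [q]).length - 2 = M.length by simp]
        rw [List.append_assoc, List.getD_eq_getElem?_getD,
          List.getElem?_append_right (le_refl M.length)]
        simp

theorem brangelina_spec : Claim_equal_brangelina := by
  intro first second _
  have h2 : brA_loop2Aux second.toList (List.range second.toList.length) 0
      = brB_j second.toList := by
    rw [List.range_eq_range']
    simpa using loop2_gen second.toList second.toList.length 0 0 (by omega)
  unfold Spec_brangelina brangelina brangelina_alt
  simp only []
  rw [cut_eq first.toList, h2]
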